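-- pv_equiv track=rewrite | github.com/MrBrantCode/unitest_baseline | mut_generate/mist_train_taco/taco_12325/solution.py | count_book_pairs
-- ===== SOURCE A (Python) =====
-- def count_book_pairs(n, m, genres):
--     # Initialize a list to count the number of books in each genre
--     genre_counts = [0] * m
--
--     # Count the number of books in each genre
--     for genre in genres:
--         genre_counts[genre - 1] += 1
--
--     # Calculate the number of ways to choose two books of different genres
--     ans = 0
--     for count in genre_counts:
--         ans += count * (n - count)
--
--     # Since each pair is counted twice, divide by 2
--     return ans // 2
-- ===== SOURCE B (Python) =====
-- def count_book_pairs(n, m, genres):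
--     # Sort the genres so equal values become contiguous, then scan runs:
--     # a run of r books of one genre pairs with the n - r other books.
--     ans = 0
--     run = 0
--     prev = None
--     for g in sorted(genres):
--         if g == prev:
--             run += 1
--         else:
--             ans += run * (n - run)
--             run = 1
--             prev = g
--     ans += run * (n - run)
--     return ans // 2
-- ===== Notes on version B (the rewrite author's own statement) =====
-- stated objective: alternative
-- what changed: Replaces the dense [0]*m genre-count array and per-bucket summation by sorting the genres and scanning runs of equal values with a single accumulator; m is never used by B.
-- intended difference: On inputs containing a nonpositive genre g with g+m also present, A's negative-index wraparound silently merges genre g into the bucket of genre g+m and returns a smaller count (e.g. 0 for (2,2,[0,2])), while B counts them as distinct genres (1 there), which is the intended pair count. — e.g. on count_book_pairs(2, 2, [0, 2]): A returns 0, B returns 1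
import Mathlib
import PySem

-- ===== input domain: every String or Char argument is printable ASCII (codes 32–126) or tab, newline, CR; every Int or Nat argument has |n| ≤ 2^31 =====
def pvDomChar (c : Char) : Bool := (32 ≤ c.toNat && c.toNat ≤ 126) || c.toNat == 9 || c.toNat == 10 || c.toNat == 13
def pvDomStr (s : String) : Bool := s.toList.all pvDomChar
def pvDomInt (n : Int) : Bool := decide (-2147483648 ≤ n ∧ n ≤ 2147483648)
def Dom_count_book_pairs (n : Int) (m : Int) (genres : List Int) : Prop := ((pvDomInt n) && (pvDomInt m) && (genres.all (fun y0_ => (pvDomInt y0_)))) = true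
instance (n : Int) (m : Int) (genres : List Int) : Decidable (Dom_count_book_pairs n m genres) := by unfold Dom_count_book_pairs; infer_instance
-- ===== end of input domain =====

-- B drops the dense [0]*m genre-count array: it sorts the genres and scans runs of equal
-- values with one accumulator (m is never used), an alternative of similar cost.

-- ===== PORT A =====
def count_book_pairs (n : Int) (m : Int) (genres : List Int) : Int :=
  let genre_counts : List Int := List.replicate m.toNat 0
  let genre_counts :=
    genres.foldl (fun gc genre =>
      PySem.List.pySetD gc (genre - 1) (PySem.List.pyGetD gc (genre - 1) 0 + 1)) genre_counts
  let ans := genre_counts.foldl (fun ans count => ans + count * (n - count)) 0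
  PySem.Int.floordiv ans 2

-- ===== PORT B =====
def count_book_pairs_alt (n : Int) (m : Int) (genres : List Int) : Int :=
  let st :=
    (PySem.List.sorted genres (fun x => x) false).foldl
      (fun (st : Int × Int × Option Int) g =>
        if some g = st.2.2 then (st.1, st.2.1 + 1, st.2.2)
        else (st.1 + st.2.1 * (n - st.2.1), 1, some g)) (0, 0, none)
  PySem.Int.floordiv (st.1 + st.2.1 * (n - st.2.1)) 2

-- ===== PRECONDITION & SPEC =====
-- Pre_ excludes exactly the inputs on which A's `genre_counts[genre - 1] += 1` raises IndexError.
def Pre_count_book_pairs (n : Int) (m : Int) (genres : List Int) : Prop :=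
  ∀ g ∈ genres, PySem.Raise.InRange m.toNat (g - 1)
instance (n : Int) (m : Int) (genres : List Int) : Decidable (Pre_count_book_pairs n m genres) := by
  unfold Pre_count_book_pairs; infer_instance

def pvWitness_count_book_pairs : Int × Int × List Int := (8, 60, [1, 2, 2, 3, 5, 5, 7, 10])

-- On inputs containing a nonpositive genre g with g+m also present, A's negative-index
-- wraparound silently merges genre g into the bucket of genre g+m and returns a smaller
-- count, while B counts them as distinct genres, which is the intended pair count.
def D_count_book_pairs (n : Int) (m : Int) (genres : List Int) : Prop :=
  ∃ g ∈ genres, g < 1 ∧ (g + m) ∈ genres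
instance (n : Int) (m : Int) (genres : List Int) : Decidable (D_count_book_pairs n m genres) := by
  unfold D_count_book_pairs; infer_instance

def Spec_count_book_pairs (n : Int) (m : Int) (genres : List Int) (out : Int) : Prop :=
  ¬ D_count_book_pairs n m genres → out = count_book_pairs_alt n m genres
instance (n : Int) (m : Int) (genres : List Int) (out : Int) : Decidable (Spec_count_book_pairs n m genres out) := by
  unfold Spec_count_book_pairs; infer_instance

def pvDiffWitness_count_book_pairs : Int × Int × List Int := (2, 2, [0, 2])
def pvDiffWitnessOut_count_book_pairs : Int × Int := (0, 1)

-- ===== CLAIM (what is proved, stated in full; the proofs are below) =====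
def Claim_unchanged_count_book_pairs : Prop := ∀ (n : Int) (m : Int) (genres : List Int), Dom_count_book_pairs n m genres → Pre_count_book_pairs n m genres → Spec_count_book_pairs n m genres (count_book_pairs n m genres)
def Claim_changed_count_book_pairs : Prop := Dom_count_book_pairs (pvDiffWitness_count_book_pairs.1) (pvDiffWitness_count_book_pairs.2.1) (pvDiffWitness_count_book_pairs.2.2) ∧ Pre_count_book_pairs (pvDiffWitness_count_book_pairs.1) (pvDiffWitness_count_book_pairs.2.1) (pvDiffWitness_count_book_pairs.2.2) ∧ D_count_book_pairs (pvDiffWitness_count_book_pairs.1) (pvDiffWitness_count_book_pairs.2.1) (pvDiffWitness_count_book_pairs.2.2) ∧ count_book_pairs (pvDiffWitness_count_book_pairs.1) (pvDiffWitness_count_book_pairs.2.1) (pvDiffWitness_count_book_pairs.2.2) = pvDiffWitnessOut_count_book_pairs.1 ∧ count_book_pairs_alt (pvDiffWitness_count_book_pairs.1) (pvDiffWitness_count_book_pairs.2.1) (pvDiffWitness_count_book_pairs.2.2) = pvDiffWitnessOut_count_book_pairs.2 ∧ pvDiffWitnessOut_count_book_pairs.1 ≠ pvDiffWitnessOut_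count_book_pairs.2

-- ===== LEMMAS AND PROOFS =====

-- Both programs are related to the same normal form: Σ_{x ∈ l} (n - l.count x), halved.
def pvT (n : Int) (l : List Int) : Int := (l.map (fun x => n - (l.count x : Int))).sum

theorem pvT_perm (n : Int) {l l' : List Int} (h : l.Perm l') : pvT n l = pvT n l' := by
  unfold pvT
  have hf : (fun x : Int => n - (l.count x : Int)) = fun x => n - (l'.count x : Int) := by
    funext x; rw [h.count_eq]
  rw [hf]
  exact (h.map _).sum_eq

theorem pv_sum_sub (f g : Int → Int) (l : List Int) :
    (l.map (fun x => f x - g x)).sum = (l.map f).sum - (l.map g).sum := by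
  induction l with
  | nil => simp
  | cons x t ih => simp [ih]; ring

theorem pv_sum_ind (h : Int) (t : List Int) :
    (t.map (fun x => if x = h then (1:Int) else 0)).sum = (t.count h : Int) := by
  induction t with
  | nil => simp
  | cons y t ih =>
    by_cases hy : y = h
    · simp [hy, ih]
      omega
    · simp [hy, ih]

theorem pvT_cons (n h : Int) (t : List Int) :
    pvT n (h :: t) = pvT n t + n - 1 - 2 * (t.count h : Int) := by
  unfold pvT
  have hmap : t.map (fun x => n - ((h :: t).count x : Int))
      = t.map (fun x => (n - (t.count x : Int)) - (if x = h then (1:Int) else 0)) := by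
    apply List.map_congr_left
    intro x _
    by_cases hx : x = h
    · subst hx
      simp [List.count_cons_self]
      omega
    · simp [List.count_cons, hx]
      exact fun hh => hx hh.symm
  simp only [List.map_cons, List.sum_cons, hmap, pv_sum_sub, pv_sum_ind]
  rw [List.count_cons_self]
  push_cast
  ring

-- B's run-scanning fold, characterised on a sorted tail.
def pvFin (n : Int) (st : Int × Int × Option Int) : Int := st.1 + st.2.1 * (n - st.2.1)

theorem pv_bfold (n : Int) :
    ∀ (l : List Int) (a r p : Int), l.Pairwise (· ≤ ·) → (∀ x ∈ l, p ≤ x) →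
    pvFin n (l.foldl
      (fun (st : Int × Int × Option Int) g =>
        if some g = st.2.2 then (st.1, st.2.1 + 1, st.2.2)
        else (st.1 + st.2.1 * (n - st.2.1), 1, some g)) (a, r, some p))
    = a + (r + (l.count p : Int)) * (n - (r + (l.count p : Int)))
        - (l.count p : Int) * (n - (l.count p : Int)) + pvT n l := by
  intro l
  induction l with
  | nil => intro a r p _ _; simp [pvT, pvFin]
  | cons h t ih =>
    intro a r p hpw hle
    have hpw' := (List.pairwise_cons.mp hpw).2
    have hht : ∀ x ∈ t, h ≤ x := (List.pairwise_cons.mp hpw).1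
    have hph : p ≤ h := hle h List.mem_cons_self
    by_cases hhp : h = p
    · subst hhp
      simp only [List.foldl_cons, if_true]
      rw [ih a (r + 1) h hpw' hht]
      rw [pvT_cons n h t, List.count_cons_self]
      push_cast
      ring
    · have hcond : (some h = some p) = False := by simp [hhp]
      simp only [List.foldl_cons, hcond, if_false]
      rw [ih (a + r * (n - r)) 1 h hpw' hht]
      have hnotin : p ∉ h :: t := by
        intro hmem
        rcases List.mem_cons.mp hmem with hc | hc
        · exact hhp hc.symm
        · have := hht p hc
          omega
      rw [List.count_eq_zero.mpr hnotin, pvT_cons n h t]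
      push_cast
      ring

-- B computes floordiv (pvT n genres) 2.
theorem pv_b_normal (n m : Int) (genres : List Int) :
    count_book_pairs_alt n m genres = PySem.Int.floordiv (pvT n genres) 2 := by
  have hperm : (PySem.List.sorted genres (fun x => x) false).Perm genres :=
    PySem.List.sorted_perm genres (fun x => x) false
  rw [← pvT_perm n hperm]
  unfold count_book_pairs_alt
  show PySem.Int.floordiv (pvFin n _) 2 = _
  cases hs : PySem.List.sorted genres (fun x => x) false with
  | nil => simp [pvT, pvFin]
  | cons h t =>
    have hpw : (h :: t).Pairwise (fun a b : Int => a ≤ b) := by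
      have := PySem.List.sorted_pairwise genres (fun x => x) (κ := Int)
      rw [hs] at this
      exact this
    have hpw' := (List.pairwise_cons.mp hpw).2
    have hht : ∀ x ∈ t, h ≤ x := (List.pairwise_cons.mp hpw).1
    have hcond : (some h = (none : Option Int)) = False := by simp
    simp only [List.foldl_cons, hcond, if_false]
    rw [pv_bfold n t (0 + 0 * (n - 0)) 1 h hpw' hht, pvT_cons n h t]
    ring_nf

-- For an in-range Python index i of a length-m list, the normalised index is (i % m).toNat.
theorem pv_idx (L : Nat) (m i : Int) (hm : 0 < m) (hL : (L : Int) = m)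
    (h : PySem.Raise.InRange L i) :
    PySem.List.pyIdx? L i = some (PySem.Int.mod i m).toNat := by
  obtain ⟨h1, h2⟩ := h
  have hmod : PySem.Int.mod i m = i % m := PySem.Int.mod_eq_emod_of_pos hm
  by_cases hi : 0 ≤ i
  · have : i % m = i := Int.emod_eq_of_lt hi (by omega)
    simp [PySem.List.pyIdx?, hi, h2, hmod, this]
  · have he : i % m = i + m := by
      have hms : (i + m) % m = i % m := by
        conv_lhs => rw [show i + m = i + m * 1 by ring]
        exact Int.add_mul_emod_self_left i m 1
      have h0 : (i + m) % m = i + m := Int.emod_eq_of_lt (by omega) (by omega)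
      rw [← hms, h0]
    simp [PySem.List.pyIdx?, hi, h1, hmod, he]
    omega

theorem pv_step_get (gc : List Int) (m i : Int) (hm : 0 < m)
    (hlen : (gc.length : Int) = m) (h : PySem.Raise.InRange gc.length i) (d : Int) :
    PySem.List.pyGetD gc i d = gc.getD (PySem.Int.mod i m).toNat d := by
  simp [PySem.List.pyGetD, PySem.List.pyGet?, pv_idx gc.length m i hm hlen h,
    List.getD_eq_getElem?_getD]

theorem pv_step_set (gc : List Int) (m i : Int) (hm : 0 < m)
    (hlen : (gc.length : Int) = m) (h : PySem.Raise.InRange gc.length i) (v : Int) :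
    PySem.List.pySetD gc i v = gc.set (PySem.Int.mod i m).toNat v := by
  simp [PySem.List.pySetD, PySem.List.pySet?, pv_idx gc.length m i hm hlen h]

-- A's counting loop produces, at slot j, the number of genres whose wrapped index is j.
theorem pv_fold_char (m : Int) (hm : 0 < m) :
    ∀ (genres : List Int) (gc : List Int), gc.length = m.toNat →
    (∀ g ∈ genres, PySem.Raise.InRange m.toNat (g - 1)) →
    genres.foldl (fun gc genre =>
      PySem.List.pySetD gc (genre - 1) (PySem.List.pyGetD gc (genre - 1) 0 + 1)) gc
    = (List.range m.toNat).map
        (fun j => gc.getD j 0 + ((genres.map (fun g => PySem.Int.mod (g - 1) m)).count ((j : Nat) : Int) : Int)) := by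
  intro genres
  induction genres with
  | nil =>
    intro gc hlen _
    simp only [List.foldl_nil, List.map_nil, List.count_nil, Nat.cast_zero, add_zero]
    apply List.ext_getElem
    · simp [hlen]
    · intro k h1 h2
      simp only [List.getElem_map, List.getElem_range]
      rw [List.getD_eq_getElem gc 0 (by omega)]
  | cons g gs ih =>
    intro gc hlen hpre
    have hcast : (gc.length : Int) = m := by rw [hlen]; omega
    have hir : PySem.Raise.InRange gc.length (g - 1) := by
      rw [hlen]; exact hpre g (List.mem_cons_self)
    have hnn : 0 ≤ PySem.Int.mod (g - 1) m := by
      rw [PySem.Int.mod_eq_emod_of_pos hm]; exact Int.emod_nonneg _ (by omega)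
    have hlt : PySem.Int.mod (g - 1) m < m := by
      rw [PySem.Int.mod_eq_emod_of_pos hm]; exact Int.emod_lt_of_pos _ hm
    set t := (PySem.Int.mod (g - 1) m).toNat with ht
    have htlt : t < m.toNat := by omega
    have hkey : PySem.Int.mod (g - 1) m = (t : Int) := by omega
    simp only [List.foldl_cons]
    rw [pv_step_get gc m (g-1) hm hcast hir, pv_step_set gc m (g-1) hm hcast hir]
    rw [ih (gc.set t (gc.getD t 0 + 1)) (by simp [hlen]) (fun g hg => hpre g (List.mem_cons_of_mem _ hg))]
    apply List.map_congr_left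
    intro j hj
    have hjlt : j < m.toNat := List.mem_range.mp hj
    simp only [List.map_cons, List.count_cons, hkey]
    rw [List.getD_eq_getElem _ 0 (by simp [hlen]; omega)]
    by_cases hjt : j = t
    · simp [hjt, List.getD_eq_getElem?_getD,
        List.getElem?_eq_getElem (show t < gc.length by omega)]
      ring
    · have hb : ((t:Int) == (j:Int)) = false := by simp; omega
      simp [List.getElem_set, List.getD_eq_getElem?_getD,
        List.getElem?_eq_getElem (show j < gc.length by omega), hb]
      exact fun h => absurd h.symm hjt

theorem pv_sum_ite (w : Int → Int) (x : Int) :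
    ∀ us : List Int, us.Nodup → x ∈ us →
    (us.map (fun k => if k = x then w k else 0)).sum = w x := by
  intro us
  induction us with
  | nil => intro _ h; cases h
  | cons u us ih =>
    intro hnd hx
    by_cases hux : u = x
    · have hxnot : x ∉ us := hux ▸ (List.nodup_cons.mp hnd).1
      have hzero : (us.map (fun k => if k = x then w k else 0)).sum = 0 := by
        apply List.sum_eq_zero
        intro y hy
        obtain ⟨k, hk, hky⟩ := List.mem_map.mp hy
        have hne : k ≠ x := fun he => hxnot (he ▸ hk)
        simpa [hne] using hky.symm
      simp [hux, hzero]
    · have hxus : x ∈ us := by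
        rcases List.mem_cons.mp hx with h | h
        · exact absurd h.symm hux
        · exact h
      simp [hux, ih (List.nodup_cons.mp hnd).2 hxus]

-- Σ_{k ∈ us} (ks.count k) * w k = Σ_{x ∈ ks} w x, for nodup us containing all of ks
theorem pv_count_sum (us : List Int) (w : Int → Int) (hnd : us.Nodup) :
    ∀ ks : List Int, (∀ x ∈ ks, x ∈ us) →
    (us.map (fun k => (ks.count k : Int) * w k)).sum = (ks.map w).sum := by
  intro ks
  induction ks with
  | nil => intro _; simp
  | cons x ks ih =>
    intro hsub
    have hx : x ∈ us := hsub x List.mem_cons_self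
    have hks : ∀ y ∈ ks, y ∈ us := fun y hy => hsub y (List.mem_cons_of_mem _ hy)
    have hsplit : ∀ k : Int, (((x :: ks).count k : Nat) : Int) * w k
        = (ks.count k : Int) * w k + (if k = x then w k else 0) := by
      intro k
      rw [List.count_cons]
      by_cases hkx : k = x
      · simp [hkx]; ring
      · have hb : (k == x) = false := by simp [hkx]
        simp [hkx]
        exact Or.inl (fun h => hkx h.symm)
    calc (us.map (fun k => ((x :: ks).count k : Int) * w k)).sum
        = (us.map (fun k => (ks.count k : Int) * w k + (if k = x then w k else 0))).sum := by
          exact congrArg List.sum (List.map_congr_left (fun k _ => hsplit k))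
      _ = (us.map (fun k => (ks.count k : Int) * w k)).sum
          + (us.map (fun k => if k = x then w k else 0)).sum := by
          rw [← List.sum_map_add]
      _ = (ks.map w).sum + w x := by rw [ih hks, pv_sum_ite w x us hnd hx]
      _ = ((x :: ks).map w).sum := by simp; ring

-- A computes floordiv (pvT n ks) 2, where ks is the list of wrapped bucket indices.
theorem pv_a_normal (n m : Int) (genres : List Int)
    (hpre : ∀ g ∈ genres, PySem.Raise.InRange m.toNat (g - 1)) :
    count_book_pairs n m genres
    = PySem.Int.floordiv (pvT n (genres.map (fun g => PySem.Int.mod (g - 1) m))) 2 := by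
  by_cases hg : genres = []
  · subst hg
    show PySem.Int.floordiv ((List.replicate m.toNat (0:Int)).foldl
      (fun ans count => ans + count * (n - count)) 0) 2 = _
    rw [PySem.List.foldl_add (List.replicate m.toNat 0) (fun c => c * (n - c)) 0]
    simp [List.map_replicate, pvT]
  · obtain ⟨g0, hg0⟩ := List.exists_mem_of_ne_nil genres hg
    have hL : 0 < m.toNat := by
      have h0 := hpre g0 hg0
      obtain ⟨ha, hb⟩ := h0
      omega
    have hm : 0 < m := by omega
    have hks : ∀ x ∈ genres.map (fun g => PySem.Int.mod (g - 1) m), 0 ≤ x ∧ x < m := by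
      intro x hx
      obtain ⟨g, hgmem, rfl⟩ := List.mem_map.mp hx
      constructor
      · rw [PySem.Int.mod_eq_emod_of_pos hm]; exact Int.emod_nonneg _ (by omega)
      · rw [PySem.Int.mod_eq_emod_of_pos hm]; exact Int.emod_lt_of_pos _ hm
    show PySem.Int.floordiv _ 2 = _
    set ks := genres.map (fun g => PySem.Int.mod (g - 1) m) with hksdef
    rw [pv_fold_char m hm genres (List.replicate m.toNat 0) (by simp) hpre]
    rw [PySem.List.foldl_add _ (fun c => c * (n - c)) 0]
    rw [List.map_map]
    have hrepl : ∀ j : Nat, j ∈ List.range m.toNat →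
        ((fun c => c * (n - c)) ∘ fun j : Nat => (List.replicate m.toNat (0:Int)).getD j 0
          + ((ks.count ((j:Nat):Int) : Nat) : Int)) j
        = (fun k : Int => (ks.count k : Int) * (n - (ks.count k : Int))) ((j : Nat) : Int) := by
      intro j hj
      simp
    rw [List.map_congr_left hrepl]
    have hmm1 : (List.range m.toNat).map
        (fun a : Nat => (fun k : Int => (ks.count k : Int) * (n - (ks.count k : Int))) ((a:Nat):Int))
        = ((List.range m.toNat).map (fun j : Nat => ((j:Nat):Int))).map
            (fun k : Int => (ks.count k : Int) * (n - (ks.count k : Int))) := by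
      rw [List.map_map]; rfl
    rw [hmm1]
    have hnd1 : ((List.range m.toNat).map (fun j : Nat => ((j:Nat):Int))).Nodup :=
      List.nodup_range.map Nat.cast_injective
    have hsub1 : ∀ x ∈ ks, x ∈ (List.range m.toNat).map (fun j : Nat => ((j:Nat):Int)) := by
      intro x hx
      obtain ⟨h0x, hxm⟩ := hks x hx
      exact List.mem_map.mpr ⟨x.toNat, List.mem_range.mpr (by omega), by omega⟩
    rw [pv_count_sum _ (fun k => n - (ks.count k : Int)) hnd1 ks hsub1]
    simp [pvT]

-- count of a mapped value equals a countP over the source list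
theorem pv_count_map (w : Int → Int) (l : List Int) (b : Int) :
    (l.map w).count b = l.countP (fun a => w a = b) := by
  induction l with
  | nil => simp
  | cons x t ih =>
    by_cases hx : w x = b
    · simp [hx, ih]
    · simp [hx, ih]

-- under Pre_ and ¬D_, the wrap g ↦ (g-1) % m is injective on the members of genres
theorem pv_nocol (m : Int) (hm : 0 < m) (genres : List Int)
    (hpre : ∀ g ∈ genres, PySem.Raise.InRange m.toNat (g - 1))
    (hnd : ¬ D_count_book_pairs 0 m genres) :
    ∀ g ∈ genres, ∀ g' ∈ genres,
      PySem.Int.mod (g' - 1) m = PySem.Int.mod (g - 1) m → g' = g := by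
  intro g hg g' hg' heq
  obtain ⟨hlo, hhi⟩ := hpre g hg
  obtain ⟨hlo', hhi'⟩ := hpre g' hg'
  have hmn : ((m.toNat : Int)) = m := by omega
  rw [hmn] at hlo hhi hlo' hhi'
  rw [PySem.Int.mod_eq_emod_of_pos hm, PySem.Int.mod_eq_emod_of_pos hm] at heq
  have hdvd : m ∣ (g' - 1) - (g - 1) := by
    have := Int.emod_emod_of_dvd (g' - 1) (dvd_refl m)
    exact Int.dvd_of_emod_eq_zero (by
      have := Int.sub_emod (g' - 1) (g - 1) m
      rw [heq] at this
      simpa using this)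
  obtain ⟨k, hk⟩ := hdvd
  have hkb : k = -1 ∨ k = 0 ∨ k = 1 := by
    have hk2 : k < 2 := by
      by_contra hc
      have hc2 : 2 ≤ k := by omega
      have h2 : m * 2 ≤ m * k := mul_le_mul_of_nonneg_left hc2 (by omega)
      linarith
    have hk3 : -2 < k := by
      by_contra hc
      have h3 : m * k ≤ m * (-2) := mul_le_mul_of_nonneg_left (by omega) (by omega)
      linarith
    omega
  rcases hkb with hk1 | hk1 | hk1 <;> subst hk1
  · exfalso
    apply hnd
    exact ⟨g', hg', by omega, by
      have hgg : g' + m = g := by omega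
      rw [hgg]; exact hg⟩
  · omega
  · exfalso
    apply hnd
    exact ⟨g, hg, by omega, by
      have hgg : g + m = g' := by omega
      rw [hgg]; exact hg'⟩

-- under Pre_ and ¬D_, the bucket multiset has the same count profile as the genre multiset
theorem pvT_wrap (n m : Int) (hm : 0 < m) (genres : List Int)
    (hpre : ∀ g ∈ genres, PySem.Raise.InRange m.toNat (g - 1))
    (hnd : ¬ D_count_book_pairs 0 m genres) :
    pvT n (genres.map (fun g => PySem.Int.mod (g - 1) m)) = pvT n genres := by
  unfold pvT
  rw [List.map_map]
  apply congrArg List.sum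
  apply List.map_congr_left
  intro g hg
  simp only [Function.comp]
  congr 1
  rw [pv_count_map]
  have : genres.countP (fun a => PySem.Int.mod (a - 1) m = PySem.Int.mod (g - 1) m)
      = genres.countP (fun a => a = g) := by
    apply List.countP_congr
    intro a ha
    constructor
    · intro h
      exact decide_eq_true (pv_nocol m hm genres hpre hnd g hg a ha (of_decide_eq_true h))
    · intro h
      have : a = g := of_decide_eq_true h
      subst this
      exact decide_eq_true rfl
  rw [this]
  have hfe : (fun a : Int => decide (a = g)) = (fun x : Int => x == g) := by
    funext a
    by_cases ha : a = g <;> simp [ha]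
  rw [hfe]
  rfl

theorem pv_main (n m : Int) (genres : List Int)
    (hpre : Pre_count_book_pairs n m genres)
    (hnd : ¬ D_count_book_pairs n m genres) :
    count_book_pairs n m genres = count_book_pairs_alt n m genres := by
  have hnd0 : ¬ D_count_book_pairs 0 m genres := hnd
  rw [pv_a_normal n m genres hpre, pv_b_normal n m genres]
  by_cases hg : genres = []
  · subst hg; rfl
  · obtain ⟨g0, hg0⟩ := List.exists_mem_of_ne_nil genres hg
    have hm : 0 < m := by
      obtain ⟨ha, hb⟩ := hpre g0 hg0
      omega
    rw [pvT_wrap n m hm genres hpre hnd0]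

-- ===== VERDICT (by name: the statement is the Claim_ definition above) =====
theorem count_book_pairs_spec : Claim_unchanged_count_book_pairs := by
  intro n m genres _ hpre hnd
  exact pv_main n m genres hpre hnd

theorem count_book_pairs_changed : Claim_changed_count_book_pairs := by
  unfold Claim_changed_count_book_pairs; decide
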